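-- pv_equiv track=rewrite | github.com/michelebenvenuto/DLP-proyect-3 | utils.py | add_parenthesis
-- ===== SOURCE A (Python) =====
-- def add_parenthesis(string):
--     i = 0
--     new_string = ''
--     set_positions = find_sets(string)
--     while i < len(string):
--         if i in set_positions and (set_positions.index(i) ) %2 == 0:
--             new_string += '≤'
--         elif i in set_positions and (set_positions.index(i)) %2 == 1:
--             new_string += '≥'
--         else:
--             new_string += string[i]
--         i += 1
--     return  new_string
--
-- def find_sets(string):
--     positions = []
--     i = 0
--     while i < len(string):
--         if string[i] == '"':
--             positions.append(i)
--         i += 1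
--     return positions
-- ===== SOURCE B (Python) =====
-- def add_parenthesis(string):
--     parts = string.split('"')
--     res = parts[0]
--     for idx, part in enumerate(parts[1:]):
--         res += ('≤' if idx % 2 == 0 else '≥') + part
--     return res
-- ===== Notes on version B (the rewrite author's own statement) =====
-- stated objective: faster
-- what changed: B splits the string once on the double-quote character and rejoins the segments with alternating '≤'/'≥', replacing A's per-character loop that precomputes all quote positions and re-scans that position list with `in` and `.index` at every character.
import Mathlib
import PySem

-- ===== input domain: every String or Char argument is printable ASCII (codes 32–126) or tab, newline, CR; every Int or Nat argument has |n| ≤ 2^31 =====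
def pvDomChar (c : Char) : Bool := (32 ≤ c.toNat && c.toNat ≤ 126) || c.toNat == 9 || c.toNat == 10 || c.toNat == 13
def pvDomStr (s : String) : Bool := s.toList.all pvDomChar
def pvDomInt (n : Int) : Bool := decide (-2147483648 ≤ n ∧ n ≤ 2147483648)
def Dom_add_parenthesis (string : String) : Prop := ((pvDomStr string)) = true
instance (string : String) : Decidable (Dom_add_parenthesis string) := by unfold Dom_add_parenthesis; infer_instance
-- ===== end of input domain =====

-- B replaces A's per-character loop over precomputed quote positions (with `in`/.index scans)
-- by one split on '"' followed by a rejoin with alternating '≤'/'≥' (objective: simpler).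

-- ===== PORT A =====
-- find_sets: collect the indices of '"' characters (Python while-loop with index i)
def pvFindSets : List Char → Int → List Int
  | [], _ => []
  | c :: rest, i =>
    if c = '"' then i :: pvFindSets rest (i + 1) else pvFindSets rest (i + 1)

-- the main while-loop of A: for each index i, emit '≤'/'≥'/the character
-- (set_positions.index(i) is only read under the `i in set_positions` guard, so getD 0 is never the default)
def pvLoopA (pos : List Int) : List Char → Int → List Char
  | [], _ => []
  | c :: rest, i =>
    (if i ∈ pos ∧ PySem.Int.mod (((PySem.List.index? pos i).getD 0 : Nat) : Int) 2 = 0 then '≤'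
     else if i ∈ pos ∧ PySem.Int.mod (((PySem.List.index? pos i).getD 0 : Nat) : Int) 2 = 1 then '≥'
     else c) :: pvLoopA pos rest (i + 1)

def add_parenthesis (string : String) : String :=
  String.ofList (pvLoopA (pvFindSets string.toList 0) string.toList 0)

-- ===== PORT B =====
def add_parenthesis_alt (string : String) : String :=
  match PySem.Chars.splitOn string.toList ['"'] with
  | [] => ""  -- unreachable: str.split never returns an empty list
  | p0 :: rest =>
    String.ofList ((PySem.List.enumerate rest 0).foldl
      (fun res iq =>
        res ++ (if PySem.Int.mod iq.1 2 = 0 then ['≤'] else ['≥']) ++ iq.2) p0)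

-- ===== PRECONDITION & SPEC =====
def Spec_add_parenthesis (string : String) (out : String) : Prop := out = add_parenthesis_alt string
instance (string : String) (out : String) : Decidable (Spec_add_parenthesis string out) := by unfold Spec_add_parenthesis; infer_instance

-- ===== CLAIM (what is proved, stated in full; the proofs are below) =====
def Claim_equal_add_parenthesis : Prop := ∀ (string : String), Dom_add_parenthesis string → Spec_add_parenthesis string (add_parenthesis string)

-- ===== LEMMAS AND PROOFS =====

-- common specification: map each char, counting quotes seen so far
def pvSpecGo : List Char → Nat → List Char
  | [], _ => []
  | c :: rest, k =>
    if c = '"' then (if k % 2 = 0 then '≤' else '≥') :: pvSpecGo rest (k + 1)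
    else c :: pvSpecGo rest k

lemma pvFindSets_ge (cs : List Char) (i : Int) : ∀ x ∈ pvFindSets cs i, i ≤ x := by
  induction cs generalizing i with
  | nil => simp [pvFindSets]
  | cons c rest ih =>
    intro x hx
    simp only [pvFindSets] at hx
    split at hx
    · rcases List.mem_cons.mp hx with h | h
      · omega
      · have := ih (i + 1) x h; omega
    · have := ih (i + 1) x hx; omega

lemma pvLoopA_spec (cs : List Char) (pre : List Int) (i : Int)
    (hpre : ∀ x ∈ pre, x < i) :
    pvLoopA (pre ++ pvFindSets cs i) cs i = pvSpecGo cs pre.length := by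
  induction cs generalizing pre i with
  | nil => simp [pvLoopA, pvSpecGo]
  | cons c rest ih =>
    have hnotpre : i ∉ pre := fun h => absurd (hpre i h) (lt_irrefl i)
    by_cases hc : c = '"'
    · subst hc
      have hfs : pvFindSets ('"' :: rest) i = i :: pvFindSets rest (i + 1) := by
        simp [pvFindSets]
      have hidx : PySem.List.index? (pre ++ i :: pvFindSets rest (i + 1)) i = some pre.length := by
        rw [PySem.List.index?_eq_some_iff]
        exact ⟨pre, pvFindSets rest (i + 1), rfl, rfl, hnotpre⟩
      have hmem : i ∈ pre ++ i :: pvFindSets rest (i + 1) := by simp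
      have hmod : PySem.Int.mod ((pre.length : Nat) : Int) 2 = ((pre.length % 2 : Nat) : Int) := by
        exact_mod_cast PySem.Int.mod_natCast pre.length 2
      have hrec : pvLoopA (pre ++ i :: pvFindSets rest (i + 1)) rest (i + 1)
          = pvSpecGo rest (pre.length + 1) := by
        have := ih (pre ++ [i]) (i + 1) (by
          intro x hx
          rcases List.mem_append.mp hx with h | h
          · have := hpre x h; omega
          · simp at h; omega)
        simpa [List.append_assoc] using this
      have hgd : ((PySem.List.index? (pre ++ i :: pvFindSets rest (i + 1)) i).getD 0) = pre.length := by
        rw [hidx]; rfl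
      rw [hfs]
      simp only [pvLoopA, pvSpecGo, if_true, hgd, hmod, hrec]
      by_cases hk : pre.length % 2 = 0
      · rw [if_pos ⟨hmem, by exact_mod_cast hk⟩, if_pos hk]
      · have hk1 : pre.length % 2 = 1 := Nat.mod_two_eq_zero_or_one pre.length |>.resolve_left hk
        rw [if_neg (by rintro ⟨-, h⟩; exact hk (by exact_mod_cast h)),
          if_pos ⟨hmem, by exact_mod_cast hk1⟩, if_neg hk]
    · have hfs : pvFindSets (c :: rest) i = pvFindSets rest (i + 1) := by
        simp [pvFindSets, hc]
      have hnot : i ∉ pre ++ pvFindSets rest (i + 1) := by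
        intro h
        rcases List.mem_append.mp h with h | h
        · exact hnotpre h
        · have := pvFindSets_ge rest (i + 1) i h; omega
      have hrec := ih pre (i + 1) (fun x hx => by have := hpre x hx; omega)
      rw [hfs]
      simp only [pvLoopA, pvSpecGo, hrec]
      rw [if_neg (fun h => hnot h.1), if_neg (fun h => hnot h.1), if_neg hc]

lemma add_parenthesis_eq_spec (cs : List Char) :
    pvLoopA (pvFindSets cs 0) cs 0 = pvSpecGo cs 0 := by
  have := pvLoopA_spec cs [] 0 (by simp)
  simpa using this

-- split on a single char, spec-level
def pvSp (q : Char) : List Char → List (List Char)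
  | [] => [[]]
  | c :: rest => if c = q then [] :: pvSp q rest else (pvSp q rest).modifyHead (c :: ·)

-- B's rejoin, recursive form
def pvBAux : List (List Char) → Nat → List Char
  | [], _ => []
  | seg :: t, k => (if k % 2 = 0 then '≤' else '≥') :: (seg ++ pvBAux t (k + 1))

lemma pvSp_ne_nil (q : Char) (l : List Char) : pvSp q l ≠ [] := by
  cases l with
  | nil => simp [pvSp]
  | cons c rest =>
    simp only [pvSp]
    split
    · simp
    · cases h : pvSp q rest with
      | nil => exact absurd h (pvSp_ne_nil q rest)
      | cons a t => simp [List.modifyHead]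

def pvConsHead (p : List Char) : List (List Char) → List (List Char)
  | [] => [p]
  | s :: t => (p ++ s) :: t

lemma pvGo_eq (q : Char) (l : List Char) :
    ∀ (fuel : Nat) (cur : List Char) (acc : List (List Char)), l.length < fuel →
    PySem.Chars.splitOn.go [q] fuel l cur acc
      = acc.reverse ++ pvConsHead cur.reverse (pvSp q l) := by
  induction l with
  | nil =>
    intro fuel cur acc h
    match fuel with
    | f + 1 => simp [PySem.Chars.splitOn.go, pvSp, pvConsHead]
  | cons c rest ih =>
    intro fuel cur acc h
    match fuel with
    | f + 1 =>
      have hf : rest.length < f := by simpa using h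
      by_cases hc : c = q
      · have hpref : List.isPrefixOf [q] (c :: rest) = true := by
          simp [List.isPrefixOf, hc]
        rw [show PySem.Chars.splitOn.go [q] (f + 1) (c :: rest) cur acc
              = PySem.Chars.splitOn.go [q] f (List.drop 1 (c :: rest)) [] (cur.reverse :: acc) by
            simp [PySem.Chars.splitOn.go, hpref]]
        simp only [List.drop_succ_cons, List.drop_zero]
        rw [ih f [] (cur.reverse :: acc) hf]
        cases hsp : pvSp q rest with
        | nil => exact absurd hsp (pvSp_ne_nil q rest)
        | cons s t => simp [pvSp, hc, hsp, pvConsHead]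
      · have hpref : List.isPrefixOf [q] (c :: rest) = false := by
          simp [List.isPrefixOf]
          exact fun h => absurd h.symm hc
        rw [show PySem.Chars.splitOn.go [q] (f + 1) (c :: rest) cur acc
              = PySem.Chars.splitOn.go [q] f rest (c :: cur) acc by
            simp [PySem.Chars.splitOn.go, hpref]]
        rw [ih f (c :: cur) acc hf]
        cases hsp : pvSp q rest with
        | nil => exact absurd hsp (pvSp_ne_nil q rest)
        | cons s t => simp [pvSp, hc, hsp, pvConsHead]

lemma splitOn_eq_pvSp (q : Char) (cs : List Char) :
    PySem.Chars.splitOn cs [q] = pvSp q cs := by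
  have h := pvGo_eq q cs (cs.length + 1) [] [] (by omega)
  rw [PySem.Chars.splitOn, h]
  cases hsp : pvSp q cs with
  | nil => exact absurd hsp (pvSp_ne_nil q cs)
  | cons s t => simp [pvConsHead]

lemma enumFold_eq_pvBAux (rest : List (List Char)) :
    ∀ (k : Nat) (p0 : List Char),
    (PySem.List.enumerate rest ((k : Nat) : Int)).foldl
      (fun res iq => res ++ (if PySem.Int.mod iq.1 2 = 0 then ['≤'] else ['≥']) ++ iq.2) p0
      = p0 ++ pvBAux rest k := by
  induction rest with
  | nil => intro k p0; simp [PySem.List.enumerate_nil, pvBAux]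
  | cons seg t ih =>
    intro k p0
    rw [PySem.List.enumerate_cons]
    simp only [List.foldl_cons]
    have hcast : ((k : Int) + 1) = (((k + 1 : Nat)) : Int) := by push_cast; ring
    have hmod : PySem.Int.mod ((k : Nat) : Int) 2 = ((k % 2 : Nat) : Int) := by
      exact_mod_cast PySem.Int.mod_natCast k 2
    rw [hcast, ih (k + 1)]
    by_cases hk : k % 2 = 0
    · rw [if_pos (by rw [hmod]; exact_mod_cast hk)]
      simp [pvBAux, hk, List.append_assoc]
    · have hk1 : k % 2 = 1 := Nat.mod_two_eq_zero_or_one k |>.resolve_left hk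
      rw [if_neg (by rw [hmod]; intro h; exact hk (by exact_mod_cast h))]
      simp [pvBAux, hk, List.append_assoc]

lemma pvSpecGo_eq_pvBAux (cs : List Char) :
    ∀ (k : Nat), pvSpecGo cs k
      = match pvSp '"' cs with
        | [] => []
        | p0 :: rest => p0 ++ pvBAux rest k := by
  induction cs with
  | nil => intro k; simp [pvSpecGo, pvSp, pvBAux]
  | cons c rest ih =>
    intro k
    by_cases hc : c = '"'
    · cases hsp : pvSp '"' rest with
      | nil => exact absurd hsp (pvSp_ne_nil _ rest)
      | cons p0' r' =>
        simp only [pvSpecGo, hc, if_true, pvSp, ih (k + 1), hsp, pvBAux]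
        simp
    · cases hsp : pvSp '"' rest with
      | nil => exact absurd hsp (pvSp_ne_nil _ rest)
      | cons p0' r' =>
        simp only [pvSpecGo, hc, pvSp, ih k, hsp, List.modifyHead]
        simp

lemma alt_eq_spec (cs : List Char) :
    (match PySem.Chars.splitOn cs ['"'] with
     | [] => ""
     | p0 :: rest =>
       String.ofList ((PySem.List.enumerate rest 0).foldl
         (fun res iq =>
           res ++ (if PySem.Int.mod iq.1 2 = 0 then ['≤'] else ['≥']) ++ iq.2) p0))
      = String.ofList (pvSpecGo cs 0) := by
  rw [splitOn_eq_pvSp]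
  cases hsp : pvSp '"' cs with
  | nil => exact absurd hsp (pvSp_ne_nil _ cs)
  | cons p0 rest =>
    have hfold := enumFold_eq_pvBAux rest 0 p0
    have hspec := pvSpecGo_eq_pvBAux cs 0
    rw [hsp] at hspec
    simp only []
    rw [show ((0 : Int)) = ((0 : Nat) : Int) by norm_num] at *
    rw [hfold, hspec]

-- ===== VERDICT (by name: the statement is the Claim_ definition above) =====
theorem add_parenthesis_spec : Claim_equal_add_parenthesis := by
  intro string _
  unfold Spec_add_parenthesis add_parenthesis add_parenthesis_alt
  rw [add_parenthesis_eq_spec]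
  exact (alt_eq_spec string.toList).symm
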